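-- pv_equiv track=rewrite | github.com/Maetthu24/adventofcode | days/y2020/day18.py | parentheses_indices
-- ===== SOURCE A (Python) =====
-- def parentheses_indices(equation):
--     opening = None
--     n = 0
--     for i in range(len(equation)):
--         if equation[i] == '(' and opening == None:
--             opening = i
--             n = 1
--         elif equation[i] == '(':
--             n += 1
--         elif equation[i] == ')':
--             if n == 1:
--                 return (opening, i)
--             else:
--                 n -= 1
-- ===== SOURCE B (Python) =====
-- def parentheses_indices(equation):
--     opening = equation.find('(')
--     if opening == -1:
--         return None
--     closing = _matching(equation, opening + 1)
--     if closing is None: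
--         return None
--     return (opening, closing)
--
--
-- def _matching(equation, i):
--     """Recursive descent: index of the ')' closing an already-open '(',
--     scanning from i; nested '(...)' groups are matched recursively and
--     skipped, so no depth counter is kept."""
--     if i >= len(equation):
--         return None
--     if equation[i] == ')':
--         return i
--     if equation[i] == '(':
--         inner = _matching(equation, i + 1)
--         if inner is None:
--             return None
--         return _matching(equation, inner + 1)
--     return _matching(equation, i + 1)
-- ===== Notes on version B (the rewrite author's own statement) =====
-- stated objective: alternative
-- what changed: Replaces A's single-pass scan with a depth counter and None-flag by two stages: str.find locates the first '(' and a recursive-descent helper finds its matching ')' by recursively matching and skipping each nested group, so no depth counter or flag exists anywhere.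
import Mathlib
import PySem

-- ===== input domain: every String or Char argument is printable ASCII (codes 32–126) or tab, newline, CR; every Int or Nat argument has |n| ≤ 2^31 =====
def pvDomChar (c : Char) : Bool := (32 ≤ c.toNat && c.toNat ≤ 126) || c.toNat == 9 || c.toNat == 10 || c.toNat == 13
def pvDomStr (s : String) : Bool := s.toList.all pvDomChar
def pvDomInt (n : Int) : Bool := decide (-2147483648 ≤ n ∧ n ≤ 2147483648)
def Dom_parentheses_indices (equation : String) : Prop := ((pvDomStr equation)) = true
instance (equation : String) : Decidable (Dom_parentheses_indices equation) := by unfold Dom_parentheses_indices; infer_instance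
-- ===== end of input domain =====

-- B replaces A's one-pass depth-counter scan by str.find for the first '(' plus a
-- recursive-descent helper that finds its matching ')' by recursively skipping nested groups.

-- ===== PORT A =====
-- A's loop: state = (opening : Option Int, n : Int); early return becomes a terminating branch.
def pvGoA (cs : List Char) (i : Int) (opening : Option Int) (n : Int) : Option (Int × Int) :=
  match cs with
  | [] => none
  | c :: rest =>
    if c = '(' ∧ opening = none then pvGoA rest (i + 1) (some i) 1
    else if c = '(' then pvGoA rest (i + 1) opening (n + 1)
    else if c = ')' then
      if n = 1 then some (opening.getD 0, i)  -- when n = 1, opening is always some o (Python returns (opening, i))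
      else pvGoA rest (i + 1) opening (n - 1)
    else pvGoA rest (i + 1) opening n

def parentheses_indices (equation : String) : Option (Int × Int) :=
  pvGoA equation.toList 0 none 0

-- ===== PORT B =====
-- Source B's _matching(equation, i): recursive descent from index i on the suffix of the string;
-- ported on the suffix list (equation[i:]) with the index i carried alongside, and a fuel
-- parameter (= the whole string's length) that only bounds the recursion depth for
-- termination — it is never reached when fuel ≥ length of the suffix.
def pvMatching (fuel : Nat) (cs : List Char) (i : Int) : Option (Int × List Char) :=
  match fuel, cs with
  | _, [] => none                    -- i >= len(equation)
  | 0, _ :: _ => none                -- fuel exhausted (unreachable)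
  | f + 1, c :: rest =>
    if c = ')' then some (i, rest)
    else if c = '(' then
      match pvMatching f rest (i + 1) with
      | none => none
      | some (inner, rest') => pvMatching f rest' (inner + 1)
    else pvMatching f rest (i + 1)

def parentheses_indices_alt (equation : String) : Option (Int × Int) :=
  let opening := PySem.Str.find equation "("
  if opening = -1 then none
  else
    match pvMatching equation.toList.length
            (equation.toList.drop (opening.toNat + 1)) (opening + 1) with
    | none => none
    | some (closing, _) => some (opening, closing)

-- ===== PRECONDITION & SPEC =====
def Spec_parentheses_indices (equation : String) (out : Option (Int × Int)) : Prop := out = parentheses_indices_alt equation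
instance (equation : String) (out : Option (Int × Int)) : Decidable (Spec_parentheses_indices equation out) := by unfold Spec_parentheses_indices; infer_instance

-- ===== CLAIM (what is proved, stated in full; the proofs are below) =====
def Claim_equal_parentheses_indices : Prop := ∀ (equation : String), Dom_parentheses_indices equation → Spec_parentheses_indices equation (parentheses_indices equation)

-- ===== LEMMAS AND PROOFS =====

-- pvMatching consumes at least one character whenever it returns.
theorem pvMatching_shrinks : ∀ (f : Nat) (cs : List Char) (i j : Int) (rest : List Char),
    pvMatching f cs i = some (j, rest) → rest.length < cs.length := by
  intro f
  induction f with
  | zero => intro cs i j rest h; cases cs <;> simp [pvMatching] at h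
  | succ f ih =>
    intro cs i j rest h
    cases cs with
    | nil => simp [pvMatching] at h
    | cons c cs' =>
      rw [pvMatching] at h
      by_cases hcl : c = ')'
      · rw [if_pos hcl] at h
        obtain ⟨rfl, rfl⟩ : i = j ∧ cs' = rest := by simpa using h
        simp
      · rw [if_neg hcl] at h
        by_cases hop : c = '('
        · rw [if_pos hop] at h
          cases hinner : pvMatching f cs' (i + 1) with
          | none => rw [hinner] at h; simp at h
          | some p =>
            rw [hinner] at h
            have h1 := ih cs' (i + 1) p.1 p.2 (by rw [hinner])
            have h2 := ih p.2 (p.1 + 1) j rest (by simpa using h)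
            simp at h1 ⊢; omega
        · rw [if_neg hop] at h
          have := ih cs' (i + 1) j rest h
          simp; omega

-- After the first '(' (A's state = (some o, n), n ≥ 1): A's counter scan equals n successive
-- recursive-descent matches.
theorem pvGoA_some_eq_matching : ∀ (f : Nat) (cs : List Char) (i o n : Int),
    cs.length ≤ f → 1 ≤ n →
    pvGoA cs i (some o) n =
      (match pvMatching f cs i with
       | none => none
       | some (j, rest) => if n = 1 then some (o, j) else pvGoA rest (j + 1) (some o) (n - 1)) := by
  intro f
  induction f with
  | zero =>
    intro cs i o n hlen _
    have : cs = [] := List.length_eq_zero_iff.mp (Nat.le_zero.mp hlen)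
    subst this; rfl
  | succ f ih =>
    intro cs i o n hlen hn
    cases cs with
    | nil => rfl
    | cons c rest =>
      by_cases hcl : c = ')'
      · rw [pvGoA, pvMatching, if_pos hcl,
          if_neg (by simp [hcl]), if_neg (by simp [hcl]), if_pos hcl]
        simp
      · by_cases hop : c = '('
        · rw [pvGoA, if_neg (by simp), if_pos hop, pvMatching, if_neg hcl, if_pos hop]
          rw [ih rest (i + 1) o (n + 1) (by simp at hlen; omega) (by omega)]
          cases h1 : pvMatching f rest (i + 1) with
          | none => simp
          | some p =>
            obtain ⟨j, rest'⟩ := p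
            have hs : rest'.length < rest.length := pvMatching_shrinks f rest (i + 1) j rest' h1
            simp only [if_neg (by omega : ¬ n + 1 = 1)]
            have : n + 1 - 1 = n := by ring
            rw [this, ih rest' (j + 1) o n (by simp at hlen; omega) hn]
        · rw [pvGoA, if_neg (by simp [hop]), if_neg hop, if_neg hcl,
            pvMatching, if_neg hcl, if_neg hop]
          exact ih rest (i + 1) o n (by simp at hlen; omega) hn

-- Before the first '(' (A's state = (none, n), n ≤ 0): A skips everything; if the string
-- contains no '(' at all, A returns None.
theorem pvGoA_none_no_open : ∀ (cs : List Char) (i n : Int), n ≤ 0 → '(' ∉ cs →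
    pvGoA cs i none n = none := by
  intro cs
  induction cs with
  | nil => intro i n _ _; rfl
  | cons c rest ih =>
    intro i n hn hmem
    simp only [List.mem_cons, not_or] at hmem
    rw [pvGoA, if_neg (by simp [Ne.symm hmem.1]), if_neg (fun h => hmem.1 h.symm)]
    by_cases hcl : c = ')'
    · rw [if_pos hcl, if_neg (by omega : ¬ n = 1)]
      exact ih (i + 1) (n - 1) (by omega) hmem.2
    · rw [if_neg hcl]; exact ih (i + 1) n hn hmem.2

-- Decomposition at the first '(': A's prefix skipping reaches state (some pre.length, 1).
theorem pvGoA_none_split : ∀ (pre suf : List Char) (i n : Int), n ≤ 0 → '(' ∉ pre →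
    pvGoA (pre ++ '(' :: suf) i none n =
      pvGoA suf (i + pre.length + 1) (some (i + pre.length)) 1 := by
  intro pre
  induction pre with
  | nil =>
    intro suf i n hn _
    rw [List.nil_append, pvGoA, if_pos ⟨rfl, rfl⟩]
    simp
  | cons c pre' ih =>
    intro suf i n hn hmem
    simp only [List.mem_cons, not_or] at hmem
    rw [List.cons_append, pvGoA, if_neg (by simp [Ne.symm hmem.1]),
      if_neg (fun h => hmem.1 h.symm)]
    have harith : (i + 1) + (pre'.length : Int) = i + ((pre'.length : Int) + 1) := by ring
    by_cases hcl : c = ')'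
    · rw [if_pos hcl, if_neg (by omega : ¬ n = 1), ih suf (i + 1) (n - 1) (by omega) hmem.2]
      simp only [List.length_cons]; push_cast; rw [harith]
    · rw [if_neg hcl, ih suf (i + 1) n hn hmem.2]
      simp only [List.length_cons]; push_cast; rw [harith]

-- [a] is a prefix of l iff l starts with a.
theorem singleton_prefix_iff (a : Char) (l : List Char) : [a] <+: l ↔ l.head? = some a := by
  cases l with
  | nil => simp
  | cons b t => simp [List.cons_prefix_cons, eq_comm]

-- ===== VERDICT (by name: the statement is the Claim_ definition above) =====
theorem parentheses_indices_spec : Claim_equal_parentheses_indices := by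
  intro equation _
  unfold Spec_parentheses_indices parentheses_indices parentheses_indices_alt
  set cs := equation.toList with hcs
  have hfind : PySem.Str.find equation "(" = PySem.Chars.find cs ['('] := by
    simp [PySem.Str.find_eq, hcs]
  by_cases h : PySem.Chars.find cs ['('] = -1
  · -- no '(' anywhere: both return none
    have hni : ¬ ['('] <:+: cs := (PySem.Chars.find_eq_neg_one_iff cs ['(']).mp h
    have hnm : '(' ∉ cs := by
      intro hm
      obtain ⟨l1, l2, hdec⟩ := List.append_of_mem hm
      exact hni ⟨l1, l2, by rw [hdec]; simp⟩
    rw [hfind, if_pos h]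
    exact pvGoA_none_no_open cs 0 0 le_rfl hnm
  · -- k = index of the first '('
    set k := PySem.Chars.find cs ['('] with hk
    have hk0 : 0 ≤ k := by
      have := PySem.Chars.neg_one_le_find cs ['(']
      rw [← hk] at this; omega
    obtain ⟨hpref, hmin⟩ := PySem.Chars.find_spec (s := cs) (sub := ['(']) hk0
    have hhead : (cs.drop k.toNat).head? = some '(' :=
      (singleton_prefix_iff '(' (cs.drop k.toNat)).mp hpref
    have hklt : k.toNat < cs.length := by
      rcases hd : cs.drop k.toNat with _ | ⟨c, t⟩
      · rw [hd] at hhead; simp at hhead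
      · by_contra hge
        have : cs.drop k.toNat = [] := List.drop_eq_nil_of_le (by omega)
        rw [this] at hd; simp at hd
    have hdropc : cs.drop k.toNat = '(' :: cs.drop (k.toNat + 1) := by
      rcases hd : cs.drop k.toNat with _ | ⟨c, t⟩
      · rw [hd] at hhead; simp at hhead
      · rw [hd] at hhead
        simp at hhead
        subst hhead
        have : t = cs.drop (k.toNat + 1) := by
          have h2 : (cs.drop k.toNat).tail = cs.drop (k.toNat + 1) := List.tail_drop ..
          rw [hd] at h2; simpa using h2
        rw [this]
    have hsplit : cs = cs.take k.toNat ++ '(' :: cs.drop (k.toNat + 1) := by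
      conv_lhs => rw [← List.take_append_drop k.toNat cs]
      rw [hdropc]
    have htklen : (cs.take k.toNat).length = k.toNat := List.length_take_of_le (by omega)
    have hpre : '(' ∉ cs.take k.toNat := by
      intro hm
      obtain ⟨i, hi, hgi⟩ := List.mem_iff_getElem.mp hm
      have hilen : i < k.toNat := by rw [htklen] at hi; exact hi
      apply hmin i hilen
      rw [singleton_prefix_iff]
      rw [List.head?_drop]
      have hics : (cs.take k.toNat)[i]'hi = '(' := hgi
      rw [List.getElem_take] at hics
      have : i < cs.length := by omega
      simp [List.getElem?_eq_getElem this, hics]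
    have hkcast : ((k.toNat : Int)) = k := Int.toNat_of_nonneg hk0
    -- A's side
    rw [hfind, if_neg h]
    conv_lhs => rw [hsplit]
    rw [pvGoA_none_split (cs.take k.toNat) (cs.drop (k.toNat + 1)) 0 0 le_rfl hpre]
    rw [htklen, hkcast]
    simp only [zero_add]
    rw [pvGoA_some_eq_matching cs.length (cs.drop (k.toNat + 1)) (k + 1) k 1
        (by simp) le_rfl]
    cases pvMatching cs.length (cs.drop (k.toNat + 1)) (k + 1) with
    | none => rfl
    | some p => rfl
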